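-- pv_equiv track=rewrite | github.com/TranXuanHuy267/SystemRequest | DatasetCreation/demo/main_gradio_2.py | best_dashboardName
-- ===== SOURCE A (Python) =====
-- def best_dashboardName(output_getDashboard_api, chi_tieu, don_vi):
--     if len(output_getDashboard_api) > 0:
--         t = 0
--         for item in output_getDashboard_api:
--             if item['dashboardName'].strip().lower() == chi_tieu:
--                 t = 1
--                 best_dashboard_id = item['dashboardId']
--                 break
--         if t == 0:
--             h = 0
--             for item in output_getDashboard_api:
--                 if item['dashboardName'].strip().lower() == don_vi:
--                     h = 1
--                     best_dashboard_id = item['dashboardId']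
--                     break
--             if h == 0:
--                 best_dashboard_id = output_getDashboard_api[0]['dashboardId']
--     else:
--         best_dashboard_id = 'NULL'
--     return best_dashboard_id
-- ===== SOURCE B (Python) =====
-- def best_dashboardName(output_getDashboard_api, chi_tieu, don_vi):
--     if not output_getDashboard_api:
--         return 'NULL'
--     don_vi_item = None
--     for item in output_getDashboard_api:
--         name = item['dashboardName'].strip().lower()
--         if name == chi_tieu:
--             return item['dashboardId']
--         if don_vi_item is None and name == don_vi:
--             don_vi_item = item
--     if don_vi_item is not None:
--         return don_vi_item['dashboardId']
--     return output_getDashboard_api[0]['dashboardId']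
-- ===== Notes on version B (the rewrite author's own statement) =====
-- stated objective: simpler
-- what changed: one pass with an early return on a chi_tieu match and a memo of the first don_vi match replaces A's two sequential scans and flag variables
import Mathlib
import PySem

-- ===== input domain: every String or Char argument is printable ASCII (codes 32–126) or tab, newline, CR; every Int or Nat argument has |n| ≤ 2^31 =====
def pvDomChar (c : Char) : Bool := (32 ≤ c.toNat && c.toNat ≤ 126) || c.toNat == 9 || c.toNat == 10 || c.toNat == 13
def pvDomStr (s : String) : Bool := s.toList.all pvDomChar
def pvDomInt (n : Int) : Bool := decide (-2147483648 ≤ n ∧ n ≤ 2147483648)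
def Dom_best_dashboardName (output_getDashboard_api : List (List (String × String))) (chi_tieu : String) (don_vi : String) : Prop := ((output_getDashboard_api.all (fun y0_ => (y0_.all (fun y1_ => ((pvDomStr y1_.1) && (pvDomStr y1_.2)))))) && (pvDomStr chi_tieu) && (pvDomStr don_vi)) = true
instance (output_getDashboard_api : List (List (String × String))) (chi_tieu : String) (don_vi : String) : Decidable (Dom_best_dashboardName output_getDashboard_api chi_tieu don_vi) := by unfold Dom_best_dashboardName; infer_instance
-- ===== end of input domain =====

-- B is a single pass (early return on the chi_tieu match, memo of the first don_vi match)
-- replacing A's two sequential scans with flag variables; same cost, simpler shape.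

-- shared primitives: item['dashboardName'].strip().lower() and item['dashboardId'] (default "" only
-- where Python raises KeyError — those inputs are excluded by Pre_)
def pvItemName (item : List (String × String)) : String :=
  PySem.Str.lower (PySem.Str.strip (PySem.Dict.getD (PySem.Dict.mk item) "dashboardName" ""))

def pvItemId (item : List (String × String)) : String :=
  PySem.Dict.getD (PySem.Dict.mk item) "dashboardId" ""

-- ===== PORT A =====
-- A's two for-loops are textually identical up to the compared string; one helper, used twice.
def pvLoopA (key : String) : List (List (String × String)) → Option String
  | [] => none
  | item :: rest =>
      if pvItemName item == key then some (pvItemId item) else pvLoopA key rest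

def best_dashboardName (output_getDashboard_api : List (List (String × String))) (chi_tieu : String) (don_vi : String) : String :=
  if output_getDashboard_api.length > 0 then
    match pvLoopA chi_tieu output_getDashboard_api with
    | some best => best
    | none =>
      match pvLoopA don_vi output_getDashboard_api with
      | some best => best
      | none => pvItemId (PySem.List.pyGetD output_getDashboard_api 0 [])
  else "NULL"

-- ===== PORT B =====
-- single pass: first component = early-returned chi_tieu match id, second = memo of first don_vi match
def pvLoopB (c d : String) : List (List (String × String)) → Option (List (String × String)) → Option String × Option (List (String × String))
  | [], dv => (none, dv)
  | item :: rest, dv =>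
      let name := pvItemName item
      if name == c then (some (pvItemId item), dv)
      else pvLoopB c d rest (if dv.isNone && name == d then some item else dv)

def best_dashboardName_alt (output_getDashboard_api : List (List (String × String))) (chi_tieu : String) (don_vi : String) : String :=
  match output_getDashboard_api with
  | [] => "NULL"
  | first :: _ =>
    match pvLoopB chi_tieu don_vi output_getDashboard_api none with
    | (some r, _) => r
    | (none, some it) => pvItemId it
    | (none, none) => pvItemId first

-- ===== PRECONDITION & SPEC =====
-- Pre_ helpers (closed-form key tests; they do not use the ports)
def pvHasKey (item : List (String × String)) (k : String) : Bool :=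
  (PySem.Dict.get? (PySem.Dict.mk item) k).isSome

def pvNameIs (s : String) (item : List (String × String)) : Bool :=
  match PySem.Dict.get? (PySem.Dict.mk item) "dashboardName" with
  | some v => PySem.Str.lower (PySem.Str.strip v) == s
  | none => false

-- Pre_ is exactly where the Python A returns (it excludes only the inputs on which A raises
-- KeyError): either the list is empty; or there is a first chi_tieu match whose item has a
-- 'dashboardId' and every earlier item has a 'dashboardName'; or all items have 'dashboardName',
-- none matches chi_tieu, and the analogous condition holds for don_vi (falling back to
-- 'dashboardId' of the first element).
def Pre_best_dashboardName (output_getDashboard_api : List (List (String × String))) (chi_tieu : String) (don_vi : String) : Prop :=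
  output_getDashboard_api = [] ∨
  (∃ i : Fin output_getDashboard_api.length,
      pvNameIs chi_tieu output_getDashboard_api[i] = true ∧
      pvHasKey output_getDashboard_api[i] "dashboardId" = true ∧
      ∀ j : Fin output_getDashboard_api.length, j < i →
        pvHasKey output_getDashboard_api[j] "dashboardName" = true ∧
        pvNameIs chi_tieu output_getDashboard_api[j] = false) ∨
  ((∀ it ∈ output_getDashboard_api,
      pvHasKey it "dashboardName" = true ∧ pvNameIs chi_tieu it = false) ∧
    ((∃ i : Fin output_getDashboard_api.length,
        pvNameIs don_vi output_getDashboard_api[i] = true ∧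
        pvHasKey output_getDashboard_api[i] "dashboardId" = true ∧
        ∀ j : Fin output_getDashboard_api.length, j < i →
          pvNameIs don_vi output_getDashboard_api[j] = false) ∨
     ((∀ it ∈ output_getDashboard_api, pvNameIs don_vi it = false) ∧
      ∀ x ∈ output_getDashboard_api.take 1, pvHasKey x "dashboardId" = true)))

instance (output_getDashboard_api : List (List (String × String))) (chi_tieu : String) (don_vi : String) : Decidable (Pre_best_dashboardName output_getDashboard_api chi_tieu don_vi) := by unfold Pre_best_dashboardName; infer_instance

def pvWitness_best_dashboardName : (List (List (String × String))) × String × String :=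
  ([[("dashboardName", " A "), ("dashboardId", "1")]], "a", "b")

def Spec_best_dashboardName (output_getDashboard_api : List (List (String × String))) (chi_tieu : String) (don_vi : String) (out : String) : Prop := out = best_dashboardName_alt output_getDashboard_api chi_tieu don_vi
instance (output_getDashboard_api : List (List (String × String))) (chi_tieu : String) (don_vi : String) (out : String) : Decidable (Spec_best_dashboardName output_getDashboard_api chi_tieu don_vi out) := by unfold Spec_best_dashboardName; infer_instance

-- ===== CLAIM (what is proved, stated in full; the proofs are below) =====
def Claim_equal_best_dashboardName : Prop := ∀ (output_getDashboard_api : List (List (String × String))) (chi_tieu : String) (don_vi : String), Dom_best_dashboardName output_getDashboard_api chi_tieu don_vi → Pre_best_dashboardName output_getDashboard_api chi_tieu don_vi → Spec_best_dashboardName output_getDashboard_api chi_tieu don_vi (best_dashboardName output_getDashboard_api chi_tieu don_vi)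

-- ===== LEMMAS AND PROOFS =====

-- the early-return component of B's single pass computes exactly A's first loop
lemma pvLoopB_fst (c d : String) (xs : List (List (String × String))) (dv : Option (List (String × String))) :
    (pvLoopB c d xs dv).1 = pvLoopA c xs := by
  induction xs generalizing dv with
  | nil => rfl
  | cons item rest ih =>
    simp only [pvLoopB, pvLoopA]
    split
    · rfl
    · exact ih _

-- when no chi_tieu match exists, B's memo is the first don_vi match of the whole list
lemma pvLoopB_snd (c d : String) (xs : List (List (String × String))) (dv : Option (List (String × String)))
    (h : pvLoopA c xs = none) :
    (pvLoopB c d xs dv).2 = dv.orElse (fun _ => xs.find? (fun it => pvItemName it == d)) := by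
  induction xs generalizing dv with
  | nil => cases dv <;> rfl
  | cons item rest ih =>
    simp only [pvLoopA] at h
    by_cases hc : (pvItemName item == c) = true
    · simp [hc] at h
    · simp only [pvLoopB, hc, List.find?]
      rw [if_neg (by simp)]
      rw [ih _ (by simpa [hc] using h)]
      cases dv with
      | none =>
        by_cases hd : (pvItemName item == d) = true <;> simp [hd]
      | some v => simp

-- A's second loop is find?-then-project
lemma pvLoopA_eq_find (key : String) (xs : List (List (String × String))) :
    pvLoopA key xs = (xs.find? (fun it => pvItemName it == key)).map pvItemId := by
  induction xs with
  | nil => rfl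
  | cons item rest ih =>
    simp only [pvLoopA, List.find?]
    by_cases h : (pvItemName item == key) = true <;> simp [h, ih]

-- ===== VERDICT (by name: the statement is the Claim_ definition above) =====
theorem best_dashboardName_spec : Claim_equal_best_dashboardName := by
  intro xs c d _ _
  unfold Spec_best_dashboardName best_dashboardName best_dashboardName_alt
  cases xs with
  | nil => rfl
  | cons x rest =>
    simp only [List.length_cons, if_pos (Nat.succ_pos rest.length)]
    rcases h1 : pvLoopA c (x :: rest) with _ | r
    · have hfst := pvLoopB_fst c d (x :: rest) none
      rw [h1] at hfst
      have hsnd := pvLoopB_snd c d (x :: rest) none h1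
      rcases hf : (x :: rest).find? (fun it => pvItemName it == d) with _ | it
      · have : pvLoopA d (x :: rest) = none := by rw [pvLoopA_eq_find, hf]; rfl
        rw [this]
        simp only [hf, Option.orElse] at hsnd
        rcases hB : pvLoopB c d (x :: rest) none with ⟨b1, b2⟩
        rw [hB] at hfst hsnd; simp at hfst hsnd; subst hfst; subst hsnd
        simp [PySem.List.pyGetD, PySem.List.pyGet?, PySem.List.pyIdx?]
      · have : pvLoopA d (x :: rest) = some (pvItemId it) := by
          rw [pvLoopA_eq_find, hf]; rfl
        rw [this]
        simp only [hf, Option.orElse] at hsnd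
        rcases hB : pvLoopB c d (x :: rest) none with ⟨b1, b2⟩
        rw [hB] at hfst hsnd; simp at hfst hsnd; subst hfst; subst hsnd; rfl
    · have hfst := pvLoopB_fst c d (x :: rest) none
      rw [h1] at hfst
      rcases hB : pvLoopB c d (x :: rest) none with ⟨b1, b2⟩
      rw [hB] at hfst; subst hfst; rfl
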